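-- pv_equiv track=rewrite | github.com/jhkimoh/Robust-KGQA | utils.py | checking_breakup
-- ===== SOURCE A (Python) =====
-- def checking_breakup(graph, q_entity, a_entity):
--     q_cnt = 0
--     a_cnt = 0
--     for t in graph:
--         if len(set(t) & set(a_entity)) != 0:
--             q_cnt += 1
--         if len(set(t) & set(q_entity)) != 0:
--             a_cnt += 1
--
--     if q_cnt == 0 or a_cnt == 0:
--         return False
--
--     return True
-- ===== SOURCE B (Python) =====
-- def checking_breakup(graph, q_entity, a_entity):
--     nodes = set()
--     for t in graph:
--         nodes.update(t)
--     return bool(nodes & set(a_entity)) and bool(nodes & set(q_entity))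
-- ===== Notes on version B (the rewrite author's own statement) =====
-- stated objective: faster
-- what changed: Replaces the per-triple double intersection scan with counters (rebuilding set(a_entity) and set(q_entity) for every triple) by a single pass collecting all graph nodes into one set followed by two intersection checks.
import Mathlib
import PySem

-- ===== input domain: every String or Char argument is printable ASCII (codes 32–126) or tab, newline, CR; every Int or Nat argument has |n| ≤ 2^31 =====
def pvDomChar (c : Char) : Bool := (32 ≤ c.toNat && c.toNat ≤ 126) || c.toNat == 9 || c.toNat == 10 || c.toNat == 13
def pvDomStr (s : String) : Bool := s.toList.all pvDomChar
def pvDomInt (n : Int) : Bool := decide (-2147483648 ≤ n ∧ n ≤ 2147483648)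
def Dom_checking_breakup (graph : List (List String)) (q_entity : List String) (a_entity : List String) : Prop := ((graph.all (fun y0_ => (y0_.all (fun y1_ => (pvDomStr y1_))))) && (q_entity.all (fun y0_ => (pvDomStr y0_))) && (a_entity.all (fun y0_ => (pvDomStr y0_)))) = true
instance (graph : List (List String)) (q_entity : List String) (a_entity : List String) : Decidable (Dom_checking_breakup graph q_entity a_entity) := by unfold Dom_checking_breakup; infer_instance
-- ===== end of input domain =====

-- B replaces A's per-triple intersection counters by one pass collecting all graph nodes
-- into a single set followed by two intersection-nonemptiness checks (objective: simpler).

-- ===== PORT A =====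
def checking_breakup (graph : List (List String)) (q_entity : List String) (a_entity : List String) : Bool :=
  let st := graph.foldl (fun (p : Int × Int) t =>
    let p := if PySem.Set.len (PySem.Set.inter (PySem.Set.ofList t) (PySem.Set.ofList a_entity)) ≠ 0 then (p.1 + 1, p.2) else p
    let p := if PySem.Set.len (PySem.Set.inter (PySem.Set.ofList t) (PySem.Set.ofList q_entity)) ≠ 0 then (p.1, p.2 + 1) else p
    p) (0, 0)
  if st.1 = 0 ∨ st.2 = 0 then false else true

-- ===== PORT B =====
def checking_breakup_alt (graph : List (List String)) (q_entity : List String) (a_entity : List String) : Bool :=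
  let nodes := graph.foldl (fun (s : PySem.Set String) t => PySem.Set.update s t) PySem.Set.empty
  !(PySem.Set.inter nodes (PySem.Set.ofList a_entity)).isEmpty && !(PySem.Set.inter nodes (PySem.Set.ofList q_entity)).isEmpty

-- ===== PRECONDITION & SPEC =====
def Spec_checking_breakup (graph : List (List String)) (q_entity : List String) (a_entity : List String) (out : Bool) : Prop := out = checking_breakup_alt graph q_entity a_entity
instance (graph : List (List String)) (q_entity : List String) (a_entity : List String) (out : Bool) : Decidable (Spec_checking_breakup graph q_entity a_entity out) := by unfold Spec_checking_breakup; infer_instance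

-- ===== CLAIM (what is proved, stated in full; the proofs are below) =====
def Claim_equal_checking_breakup : Prop := ∀ (graph : List (List String)) (q_entity : List String) (a_entity : List String), Dom_checking_breakup graph q_entity a_entity → Spec_checking_breakup graph q_entity a_entity (checking_breakup graph q_entity a_entity)

-- ===== LEMMAS AND PROOFS =====

-- "triple t hits entity list e": the condition A tests per triple
def pvHit (e : List String) (t : List String) : Bool :=
  PySem.Set.len (PySem.Set.inter (PySem.Set.ofList t) (PySem.Set.ofList e)) ≠ 0

theorem pvHit_iff (e t : List String) :
    pvHit e t = true ↔ ∃ x, x ∈ t ∧ x ∈ e := by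
  simp [pvHit, PySem.Set.len]
  constructor
  · intro h
    rcases List.exists_mem_of_ne_nil _ h with ⟨x, hx⟩
    have := (PySem.Set.mem_inter (s := PySem.Set.ofList t) (t := PySem.Set.ofList e) (y := x)).1 hx
    exact ⟨x, by simpa [PySem.Set.mem_ofList] using this⟩
  · rintro ⟨x, hxt, hxe⟩ hnil
    have : x ∈ PySem.Set.inter (PySem.Set.ofList t) (PySem.Set.ofList e) := by
      rw [PySem.Set.mem_inter]
      simp [PySem.Set.mem_ofList, hxt, hxe]
    simp [hnil] at this

-- A's fold adds the number of hitting triples to each counter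
theorem pvFoldA (graph : List (List String)) (q_entity a_entity : List String) :
    ∀ p : Int × Int,
      graph.foldl (fun (p : Int × Int) t =>
        let p := if PySem.Set.len (PySem.Set.inter (PySem.Set.ofList t) (PySem.Set.ofList a_entity)) ≠ 0 then (p.1 + 1, p.2) else p
        let p := if PySem.Set.len (PySem.Set.inter (PySem.Set.ofList t) (PySem.Set.ofList q_entity)) ≠ 0 then (p.1, p.2 + 1) else p
        p) p
      = (p.1 + (graph.countP (pvHit a_entity) : Int), p.2 + (graph.countP (pvHit q_entity) : Int)) := by
  induction graph with
  | nil => simp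
  | cons t rest ih =>
    intro p
    simp only [List.foldl_cons, List.countP_cons, ih]
    by_cases ha : PySem.Set.inter (PySem.Set.ofList t) (PySem.Set.ofList a_entity) = [] <;>
      by_cases hq : PySem.Set.inter (PySem.Set.ofList t) (PySem.Set.ofList q_entity) = [] <;>
        simp [pvHit, PySem.Set.len, ha, hq, Prod.ext_iff] <;> omega

-- membership in B's accumulated node set
theorem pvFoldB (graph : List (List String)) :
    ∀ (s : PySem.Set String) (x : String),
      (x ∈ graph.foldl (fun (s : PySem.Set String) t => PySem.Set.update s t) s)
        ↔ x ∈ s ∨ ∃ t, t ∈ graph ∧ x ∈ t := by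
  induction graph with
  | nil => simp
  | cons t rest ih =>
    intro s x
    simp [List.foldl_cons, ih, PySem.Set.mem_update]
    tauto

-- ===== VERDICT (by name: the statement is the Claim_ definition above) =====
theorem checking_breakup_spec : Claim_equal_checking_breakup := by
  intro graph q_entity a_entity _
  show checking_breakup graph q_entity a_entity = checking_breakup_alt graph q_entity a_entity
  unfold checking_breakup checking_breakup_alt
  simp only [pvFoldA graph q_entity a_entity (0, 0)]
  have hcnt : ∀ e : List String, (((graph.countP (pvHit e) : Int) = 0) ↔ ¬ ∃ t, t ∈ graph ∧ ∃ x, x ∈ t ∧ x ∈ e) := by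
    intro e
    rw [show ((graph.countP (pvHit e) : Int) = 0 ↔ graph.countP (pvHit e) = 0) by omega]
    rw [List.countP_eq_zero]
    simp only [← Bool.not_eq_true, pvHit_iff]
    aesop
  have hB : ∀ e : List String,
      ((PySem.Set.inter (graph.foldl (fun (s : PySem.Set String) t => PySem.Set.update s t) PySem.Set.empty) (PySem.Set.ofList e)) = []
        ↔ ¬ ∃ t, t ∈ graph ∧ ∃ x, x ∈ t ∧ x ∈ e) := by
    intro e
    rw [List.eq_nil_iff_forall_not_mem]
    constructor
    · intro h ⟨t, ht, x, hxt, hxe⟩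
      exact h x (by
        rw [PySem.Set.mem_inter]
        exact ⟨(pvFoldB graph _ x).2 (Or.inr ⟨t, ht, hxt⟩), (PySem.Set.mem_ofList _ _).2 hxe⟩)
    · intro h x hx
      rw [PySem.Set.mem_inter] at hx
      obtain ⟨hxn, hxe⟩ := hx
      rcases (pvFoldB graph _ x).1 hxn with h' | ⟨t, ht, hxt⟩
      · simp [PySem.Set.empty] at h'
      · exact h ⟨t, ht, x, hxt, (PySem.Set.mem_ofList _ _).1 hxe⟩
  have hall : ∀ e : List String, ((∀ t ∈ graph, pvHit e t = false) ↔ ¬ ∃ t, t ∈ graph ∧ ∃ x, x ∈ t ∧ x ∈ e) := by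
    intro e
    simp only [← Bool.not_eq_true, pvHit_iff]
    aesop
  by_cases hA : ∃ t, t ∈ graph ∧ ∃ x, x ∈ t ∧ x ∈ a_entity <;>
    by_cases hQ : ∃ t, t ∈ graph ∧ ∃ x, x ∈ t ∧ x ∈ q_entity <;> · 
      simp only [PySem.Set.empty] at hB
      simp [hall a_entity, hall q_entity, hA, hQ, hB a_entity, hB q_entity]
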